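-- pv_equiv track=rewrite | github.com/royayij/MisConfLinter | MisConfLinter/misconftypes/parsing.py | common_items_def
-- ===== SOURCE A (Python) =====
-- def common_items_def(pos_1, pos_2):
--     # Find the common items in the order of list 'a'
--     a = pos_1.copy()
--     b = pos_2.copy()
--     common_items = []
--     for item in a:
--         if item in b and (item != 'punct'):
--             common_items.append(item)
--             b = b[b.index(item) + 1:]
--     return common_items
-- ===== SOURCE B (Python) =====
-- def common_items_def(pos_1, pos_2):
--     # Greedy ordered common-subsequence match, done in O((n+m) log m):
--     # precompute value -> sorted list of its indices in pos_2, then walk pos_1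
--     # with a moving pointer p, binary-searching the next occurrence >= p.
--     occ = {}
--     for i, v in enumerate(pos_2):
--         if v in occ:
--             occ[v].append(i)
--         else:
--             occ[v] = [i]
--     out = []
--     p = 0
--     for item in pos_1:
--         if item == 'punct' or item not in occ:
--             continue
--         idxs = occ[item]
--         # bisect_left(idxs, p), hand-written (no imports in the original module)
--         lo, hi = 0, len(idxs)
--         while lo < hi:
--             mid = (lo + hi) // 2
--             if idxs[mid] < p:
--                 lo = mid + 1
--             else:
--                 hi = mid
--         if lo < len(idxs):
--             out.append(item)
--             p = idxs[lo] + 1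
--     return out
-- ===== Notes on version B (the rewrite author's own statement) =====
-- stated objective: faster
-- what changed: A repeatedly rescans and reslices a shrinking copy of pos_2 (membership test, .index, slice per matched item); B precomputes a value->sorted-indices dict over pos_2 once and walks pos_1 with a moving pointer, finding each next occurrence by a hand-written bisect_left.
import Mathlib
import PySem

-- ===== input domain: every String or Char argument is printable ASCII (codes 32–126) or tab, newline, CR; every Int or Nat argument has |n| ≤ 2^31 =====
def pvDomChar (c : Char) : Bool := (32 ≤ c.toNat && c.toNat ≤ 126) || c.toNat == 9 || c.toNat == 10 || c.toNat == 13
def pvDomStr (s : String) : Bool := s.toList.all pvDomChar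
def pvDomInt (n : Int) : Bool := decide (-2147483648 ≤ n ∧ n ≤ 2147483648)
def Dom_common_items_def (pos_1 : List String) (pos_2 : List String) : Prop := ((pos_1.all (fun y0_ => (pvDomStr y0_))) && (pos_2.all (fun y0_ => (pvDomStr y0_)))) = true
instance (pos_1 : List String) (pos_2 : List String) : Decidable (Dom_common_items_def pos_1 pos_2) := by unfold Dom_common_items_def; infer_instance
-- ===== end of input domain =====

-- B replaces A's repeated membership test / .index / list-slicing pass over the shrinking list b
-- (O(|pos_1|·|pos_2|)) by a precomputed value→sorted-indices map over pos_2 plus a moving pointer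
-- with binary search for the next occurrence (O((|pos_1|+|pos_2|)·log|pos_2|)); same return value.

-- ===== PORT A =====
-- one iteration of A's for-loop; state = (common_items, b).
-- Python's b.index(item) can raise only when item ∉ b, which the guard excludes; the
-- .getD 0 below is therefore only ever taken on a 'some'.
def pvStepA (st : List String × List String) (item : String) : List String × List String :=
  if item ∈ st.2 ∧ item ≠ "punct" then
    (st.1 ++ [item],
     PySem.List.slice st.2 (some ((((PySem.List.index? st.2 item).getD 0 : Nat) : Int) + 1)) none)
  else st

def common_items_def (pos_1 : List String) (pos_2 : List String) : List String :=
  -- a = pos_1.copy(); b = pos_2.copy() : copies of immutable Lean lists are the lists themselves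
  (pos_1.foldl pvStepA ([], pos_2)).1

-- ===== PORT B =====
-- one iteration of B's dict-building loop over enumerate(pos_2)
def pvOccStep (occ : PySem.Dict String (List Int)) (iv : Int × String) : PySem.Dict String (List Int) :=
  if occ.contains iv.2 then occ.insert iv.2 (occ.getD iv.2 [] ++ [iv.1])
  else occ.insert iv.2 [iv.1]

def pvBuildOcc (pos_2 : List String) : PySem.Dict String (List Int) :=
  (PySem.List.enumerate pos_2).foldl pvOccStep PySem.Dict.empty

-- Source B's hand-written bisect_left while-loop; lo/hi stay in [0, len] so Nat matches Python's ints,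
-- and idxs[mid] (mid < hi ≤ len, in range) is PySem.List.pyGetD
def pvBsearch (idxs : List Int) (p : Int) (lo hi : Nat) : Nat :=
  if lo < hi then
    let mid := (lo + hi) / 2
    if PySem.List.pyGetD idxs (mid : Int) 0 < p then pvBsearch idxs p (mid + 1) hi
    else pvBsearch idxs p lo mid
  else lo
termination_by hi - lo
decreasing_by all_goals omega

-- one iteration of B's main loop; state = (out, p)
def pvStepB (occ : PySem.Dict String (List Int)) (st : List String × Int) (item : String) : List String × Int :=
  if item = "punct" ∨ occ.contains item = false then st
  else
    let idxs := occ.getD item []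
    let lo := pvBsearch idxs st.2 0 idxs.length
    if lo < idxs.length then (st.1 ++ [item], PySem.List.pyGetD idxs (lo : Int) 0 + 1)
    else st

def common_items_def_alt (pos_1 : List String) (pos_2 : List String) : List String :=
  (pos_1.foldl (pvStepB (pvBuildOcc pos_2)) ([], 0)).1

-- ===== PRECONDITION & SPEC =====
def Spec_common_items_def (pos_1 : List String) (pos_2 : List String) (out : List String) : Prop := out = common_items_def_alt pos_1 pos_2
instance (pos_1 : List String) (pos_2 : List String) (out : List String) : Decidable (Spec_common_items_def pos_1 pos_2 out) := by unfold Spec_common_items_def; infer_instance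

-- ===== CLAIM (what is proved, stated in full; the proofs are below) =====
def Claim_equal_common_items_def : Prop := ∀ (pos_1 : List String) (pos_2 : List String), Dom_common_items_def pos_1 pos_2 → Spec_common_items_def pos_1 pos_2 (common_items_def pos_1 pos_2)

-- ===== LEMMAS AND PROOFS =====

-- the Int indices (counting from k) at which `it` occurs in l
def pvOccs (l : List String) (k : Int) (it : String) : List Int :=
  match l with
  | [] => []
  | x :: xs => if x = it then k :: pvOccs xs (k + 1) it else pvOccs xs (k + 1) it

theorem pvOccs_ge (l : List String) (k : Int) (it : String) :
    ∀ j ∈ pvOccs l k it, k ≤ j := by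
  induction l generalizing k with
  | nil => simp [pvOccs]
  | cons x xs ih =>
    intro j hj
    simp only [pvOccs] at hj
    split at hj
    · rw [List.mem_cons] at hj
      rcases hj with h | h
      · omega
      · have := ih (k + 1) j h; omega
    · have := ih (k + 1) j hj; omega

theorem pvOccs_sorted (l : List String) (k : Int) (it : String) :
    (pvOccs l k it).Pairwise (· ≤ ·) := by
  induction l generalizing k with
  | nil => simp [pvOccs]
  | cons x xs ih =>
    simp only [pvOccs]
    split
    · exact List.Pairwise.cons (fun j hj => by have := pvOccs_ge xs (k+1) it j hj; omega) (ih (k+1))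
    · exact ih (k + 1)

theorem pvOccs_eq_nil_iff (l : List String) (k : Int) (it : String) :
    pvOccs l k it = [] ↔ it ∉ l := by
  induction l generalizing k with
  | nil => simp [pvOccs]
  | cons x xs ih =>
    simp only [pvOccs, List.mem_cons]
    split
    · simp_all
    · rw [ih (k + 1)]; simp_all [eq_comm]

theorem pvOccs_head (l : List String) (k : Int) (it : String) (h : it ∈ l) :
    (pvOccs l k it).head? = some (k + (l.idxOf it : Int)) := by
  induction l generalizing k with
  | nil => simp at h
  | cons x xs ih =>
    simp only [pvOccs]
    by_cases hx : x = it
    · simp [hx, List.idxOf_cons_self]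
    · have hm : it ∈ xs := by rcases List.mem_cons.mp h with h' | h' <;> simp_all [eq_comm]
      rw [if_neg hx, ih (k + 1) hm, List.idxOf_cons_ne _ (by simp [hx])]
      simp only [Option.some.injEq]
      push_cast
      ring

theorem dropWhile_self_of_ge {p : Int} {m : List Int} (h : ∀ j ∈ m, p ≤ j) :
    m.dropWhile (fun j => decide (j < p)) = m := by
  cases m with
  | nil => rfl
  | cons y ys =>
    rw [List.dropWhile_cons]
    have : ¬ (y < p) := by have := h y (by simp); omega
    simp [this]

theorem pvOccs_dropWhile (l : List String) (it : String) :
    ∀ (k p : Nat), k ≤ p →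
      (pvOccs l (k : Int) it).dropWhile (fun j => decide (j < (p : Int))) =
        pvOccs (l.drop (p - k)) (p : Int) it := by
  induction l with
  | nil => intro k p _; simp [pvOccs]
  | cons x xs ih =>
    intro k p hkp
    rcases Nat.eq_or_lt_of_le hkp with heq | hlt
    · subst heq
      simp only [Nat.sub_self, List.drop_zero]
      apply dropWhile_self_of_ge
      intro j hj
      exact pvOccs_ge (x :: xs) (k : Int) it j hj
    · have hc : ((k : Int) + 1) = ((k + 1 : Nat) : Int) := by push_cast; ring
      have hd : (x :: xs).drop (p - k) = xs.drop (p - (k + 1)) := by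
        have h1 : p - k = (p - (k + 1)) + 1 := by omega
        rw [h1, List.drop_succ_cons]
      simp only [pvOccs]
      split
      · rw [List.dropWhile_cons]
        have : ((k : Int) < (p : Int)) := by exact_mod_cast hlt
        simp only [this, decide_true, if_true]
        rw [hc, ih (k + 1) p (by omega), hd]
      · rw [hc, ih (k + 1) p (by omega), hd]

-- dict lemmas
theorem pvOccStep_getD (d : PySem.Dict String (List Int)) (k : Int) (x it : String) :
    (pvOccStep d (k, x)).getD it [] = d.getD it [] ++ (if x = it then [k] else []) := by
  unfold pvOccStep
  by_cases hc : d.contains x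
  · rw [if_pos hc, PySem.Dict.getD_insert]
    by_cases he : it = x
    · subst he; simp
    · simp [he, Ne.symm he]
  · rw [if_neg hc, PySem.Dict.getD_insert]
    by_cases he : it = x
    · subst he
      rw [PySem.Dict.getD_of_not_contains (h := by simpa using hc)]
      simp
    · simp [he, Ne.symm he]

theorem pvOccStep_contains (d : PySem.Dict String (List Int)) (k : Int) (x it : String) :
    (pvOccStep d (k, x)).contains it = (d.contains it || decide (it = x)) := by
  unfold pvOccStep
  by_cases hc : d.contains x
  · rw [if_pos hc, PySem.Dict.contains_insert]
    simp [Bool.or_comm, beq_eq_decide]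
  · rw [if_neg hc, PySem.Dict.contains_insert]
    simp [Bool.or_comm, beq_eq_decide]

theorem pvBuildOcc_getD (xs : List String) :
    ∀ (k : Int) (d : PySem.Dict String (List Int)) (it : String),
      ((PySem.List.enumerate xs k).foldl pvOccStep d).getD it [] = d.getD it [] ++ pvOccs xs k it := by
  induction xs with
  | nil => intro k d it; simp [PySem.List.enumerate_nil, pvOccs]
  | cons x xs ih =>
    intro k d it
    rw [PySem.List.enumerate_cons, List.foldl_cons, ih, pvOccStep_getD]
    simp only [pvOccs]
    by_cases he : x = it <;> simp [he]

theorem pvBuildOcc_contains (xs : List String) :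
    ∀ (k : Int) (d : PySem.Dict String (List Int)) (it : String),
      ((PySem.List.enumerate xs k).foldl pvOccStep d).contains it = (d.contains it || decide (it ∈ xs)) := by
  induction xs with
  | nil => intro k d it; simp [PySem.List.enumerate_nil]
  | cons x xs ih =>
    intro k d it
    rw [PySem.List.enumerate_cons, List.foldl_cons, ih, pvOccStep_contains]
    by_cases he : it = x <;> simp [he, Bool.or_comm]

-- binary-search correctness
theorem pvBsearch_spec (idxs : List Int) (p : Int) (hs : idxs.Pairwise (· ≤ ·)) :
    ∀ (n lo hi : Nat), hi - lo ≤ n → lo ≤ hi → hi ≤ idxs.length →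
      (∀ j (hj : j < idxs.length), j < lo → idxs[j] < p) →
      (∀ j (hj : j < idxs.length), hi ≤ j → p ≤ idxs[j]) →
      pvBsearch idxs p lo hi ≤ idxs.length ∧
      (∀ j (hj : j < idxs.length), j < pvBsearch idxs p lo hi → idxs[j] < p) ∧
      (∀ j (hj : j < idxs.length), pvBsearch idxs p lo hi ≤ j → p ≤ idxs[j]) := by
  have hmono : ∀ (i j : Nat) (hi' : i < idxs.length) (hj' : j < idxs.length), i ≤ j →
      idxs[i] ≤ idxs[j] := by
    intro i j hi' hj' hij
    rcases Nat.eq_or_lt_of_le hij with h | h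
    · subst h; exact le_refl _
    · exact (List.pairwise_iff_getElem.mp hs) i j hi' hj' h
  intro n
  induction n with
  | zero =>
    intro lo hi h0 hle hlen hlo hhi
    have hEq : lo = hi := by omega
    rw [pvBsearch, if_neg (by omega)]
    exact ⟨by omega, fun j hj hjlo => hlo j hj hjlo, fun j hj hjlo => hhi j hj (by omega)⟩
  | succ n ih =>
    intro lo hi h0 hle hlen hlo hhi
    by_cases hlt : lo < hi
    · rw [pvBsearch, if_pos hlt]
      have hmid : (lo + hi) / 2 < idxs.length := by omega
      have hget : PySem.List.pyGetD idxs (((lo + hi) / 2 : Nat) : Int) 0 = idxs[(lo + hi) / 2] := by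
        rw [PySem.List.pyGetD_natCast, List.getD_eq_getElem _ _ hmid]
      simp only [hget]
      by_cases hcmp : idxs[(lo + hi) / 2] < p
      · rw [if_pos hcmp]
        exact ih ((lo + hi) / 2 + 1) hi (by omega) (by omega) hlen
          (fun j hj hjlo => lt_of_le_of_lt (hmono j ((lo + hi) / 2) hj hmid (by omega)) hcmp)
          hhi
      · rw [if_neg hcmp]
        exact ih lo ((lo + hi) / 2) (by omega) (by omega) (by omega) hlo
          (fun j hj hjlo => le_trans (le_of_not_gt hcmp) (hmono ((lo + hi) / 2) j hmid hj hjlo))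
    · rw [pvBsearch, if_neg hlt]
      have hEq : lo = hi := by omega
      exact ⟨by omega, fun j hj hjlo => hlo j hj hjlo, fun j hj hjlo => hhi j hj (by omega)⟩

theorem dropWhile_eq_drop_of {P : Int → Bool} :
    ∀ (m : List Int) (r : Nat), r ≤ m.length →
    (∀ j (hj : j < m.length), j < r → P m[j] = true) →
    (∀ (hj : r < m.length), P m[r] = false) →
    m.dropWhile P = m.drop r := by
  intro m
  induction m with
  | nil => intro r _ _ _; simp
  | cons x xs ih =>
    intro r hr h1 h2
    cases r with
    | zero =>
      have h0 : P x = false := by simpa using h2 (by simp)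
      simp [h0]
    | succ r =>
      have h0 : P x = true := by simpa using h1 0 (by simp) (by omega)
      rw [List.dropWhile_cons, h0]
      simp only [if_true, List.drop_succ_cons]
      exact ih r (by simpa using hr)
        (fun j hj hjr => by simpa using h1 (j + 1) (by simpa using Nat.succ_lt_succ hj) (by omega))
        (fun hj => by simpa using h2 (by simpa using Nat.succ_lt_succ hj))

theorem index?_getD_of_mem {b : List String} {item : String} (h : item ∈ b) :
    (PySem.List.index? b item).getD 0 = b.idxOf item := by
  induction b with
  | nil => simp at h
  | cons x xs ih =>
    by_cases hx : x = item
    · subst hx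
      rw [PySem.List.index?_cons_self, List.idxOf_cons_self]
      rfl
    · have hm : item ∈ xs := by rcases List.mem_cons.mp h with h' | h' <;> simp_all [eq_comm]
      rw [PySem.List.index?_cons_of_ne _ hx, List.idxOf_cons_ne _ (by simp [hx])]
      rcases ho : PySem.List.index? xs item with _ | n
      · exact absurd ((PySem.List.index?_eq_none_iff _ _).mp ho) (by simpa using hm)
      · have := ih hm
        rw [ho] at this
        simp_all

-- the main loop correspondence
theorem pvLoop_eq (pos_2 : List String) :
    ∀ (a : List String) (acc : List String) (p : Nat),
      (a.foldl pvStepA (acc, pos_2.drop p)).1 =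
        (a.foldl (pvStepB (pvBuildOcc pos_2)) (acc, (p : Int))).1 := by
  intro a
  induction a with
  | nil => intro acc p; rfl
  | cons item rest ih =>
    intro acc p
    rw [List.foldl_cons, List.foldl_cons]
    by_cases hpn : item = "punct"
    · rw [show pvStepA (acc, pos_2.drop p) item = (acc, pos_2.drop p) from by
            simp [pvStepA, hpn],
          show pvStepB (pvBuildOcc pos_2) (acc, (p : Int)) item = (acc, (p : Int)) from by
            simp [pvStepB, hpn]]
      exact ih acc p
    · have hocc : (pvBuildOcc pos_2).getD item [] = pvOccs pos_2 0 item := by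
        unfold pvBuildOcc
        rw [pvBuildOcc_getD]
        simp
      have hcont : (pvBuildOcc pos_2).contains item = decide (item ∈ pos_2) := by
        unfold pvBuildOcc
        rw [pvBuildOcc_contains]
        simp
      by_cases hmem2 : item ∈ pos_2
      · -- item occurs somewhere in pos_2; B runs the binary search
        have hsorted : ((pvBuildOcc pos_2).getD item []).Pairwise (· ≤ ·) := by
          rw [hocc]; exact pvOccs_sorted pos_2 0 item
        obtain ⟨hrlen, hA1, hA2⟩ :=
          pvBsearch_spec ((pvBuildOcc pos_2).getD item []) ((p : Nat) : Int) hsorted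
            ((pvBuildOcc pos_2).getD item []).length 0 ((pvBuildOcc pos_2).getD item []).length
            (by omega) (by omega) (le_refl _)
            (fun j hj hj0 => absurd hj0 (by omega))
            (fun j hj hge => absurd hj (by omega))
        have hdrop : ((pvBuildOcc pos_2).getD item []).dropWhile (fun j => decide (j < ((p : Nat) : Int))) =
            ((pvBuildOcc pos_2).getD item []).drop
              (pvBsearch ((pvBuildOcc pos_2).getD item []) ((p : Nat) : Int) 0
                ((pvBuildOcc pos_2).getD item []).length) := by
          apply dropWhile_eq_drop_of _ _ hrlen
          · intro j hj hjr
            simpa using hA1 j hj hjr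
          · intro hj
            simpa using hA2 _ hj (le_refl _)
        have hdw2 : ((pvBuildOcc pos_2).getD item []).dropWhile (fun j => decide (j < ((p : Nat) : Int))) =
            pvOccs (pos_2.drop p) ((p : Nat) : Int) item := by
          rw [hocc]
          have := pvOccs_dropWhile pos_2 item 0 p (Nat.zero_le p)
          simpa using this
        have hdd : ((pvBuildOcc pos_2).getD item []).drop
              (pvBsearch ((pvBuildOcc pos_2).getD item []) ((p : Nat) : Int) 0
                ((pvBuildOcc pos_2).getD item []).length) =
            pvOccs (pos_2.drop p) ((p : Nat) : Int) item := by
          rw [← hdrop, hdw2]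
        by_cases hb : item ∈ pos_2.drop p
        · -- item still ahead of the pointer: both sides take it
          have hne : pvOccs (pos_2.drop p) ((p : Nat) : Int) item ≠ [] := by
            intro h
            exact (pvOccs_eq_nil_iff _ _ _).mp h hb
          have hrlt : pvBsearch ((pvBuildOcc pos_2).getD item []) ((p : Nat) : Int) 0
              ((pvBuildOcc pos_2).getD item []).length < ((pvBuildOcc pos_2).getD item []).length := by
            by_contra h
            exact hne (by rw [← hdd, List.drop_eq_nil_iff]; omega)
          -- the found index is p + idxOf item (pos_2.drop p)
          have hval : PySem.List.pyGetD ((pvBuildOcc pos_2).getD item [])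
              ((pvBsearch ((pvBuildOcc pos_2).getD item []) ((p : Nat) : Int) 0
                ((pvBuildOcc pos_2).getD item []).length : Nat) : Int) 0 =
              ((p : Nat) : Int) + ((pos_2.drop p).idxOf item : Int) := by
            rw [PySem.List.pyGetD_natCast, List.getD_eq_getElem _ _ hrlt]
            have h1 : (((pvBuildOcc pos_2).getD item []).drop
                (pvBsearch ((pvBuildOcc pos_2).getD item []) ((p : Nat) : Int) 0
                  ((pvBuildOcc pos_2).getD item []).length)).head? =
                some (((pvBuildOcc pos_2).getD item [])[pvBsearch ((pvBuildOcc pos_2).getD item [])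
                  ((p : Nat) : Int) 0 ((pvBuildOcc pos_2).getD item []).length]) := by
              rw [List.head?_drop, List.getElem?_eq_getElem hrlt]
            rw [hdd, pvOccs_head _ _ _ hb] at h1
            exact (Option.some.injEq _ _).mp h1.symm
          have hsA : pvStepA (acc, pos_2.drop p) item =
              (acc ++ [item], pos_2.drop (((pos_2.drop p).idxOf item + 1) + p)) := by
            unfold pvStepA
            rw [if_pos ⟨hb, hpn⟩]
            rw [index?_getD_of_mem hb]
            have hc : (((pos_2.drop p).idxOf item : Int) + 1) = (((pos_2.drop p).idxOf item + 1 : Nat) : Int) := by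
              push_cast; ring
            rw [hc, PySem.List.slice_from_natCast, List.drop_drop, Nat.add_comm]
          have hsB : pvStepB (pvBuildOcc pos_2) (acc, ((p : Nat) : Int)) item =
              (acc ++ [item], (((((pos_2.drop p).idxOf item + 1) + p : Nat)) : Int)) := by
            unfold pvStepB
            rw [if_neg (by simp [hpn, hcont, hmem2])]
            simp only []
            rw [if_pos hrlt, hval]
            push_cast
            rw [Prod.mk.injEq]
            exact ⟨rfl, by ring⟩
          rw [hsA, hsB]
          exact ih (acc ++ [item]) (((pos_2.drop p).idxOf item + 1) + p)
        · -- item only occurs before the pointer: both sides skip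
          have hnil : pvOccs (pos_2.drop p) ((p : Nat) : Int) item = [] :=
            (pvOccs_eq_nil_iff _ _ _).mpr hb
          have hge : ((pvBuildOcc pos_2).getD item []).length ≤
              pvBsearch ((pvBuildOcc pos_2).getD item []) ((p : Nat) : Int) 0
                ((pvBuildOcc pos_2).getD item []).length := by
            rw [← List.drop_eq_nil_iff, hdd, hnil]
          rw [show pvStepA (acc, pos_2.drop p) item = (acc, pos_2.drop p) from by
                simp [pvStepA, hb],
              show pvStepB (pvBuildOcc pos_2) (acc, (p : Int)) item = (acc, (p : Int)) from by
                unfold pvStepB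
                rw [if_neg (by simp [hpn, hcont, hmem2])]
                simp only []
                rw [if_neg (by omega)]]
          exact ih acc p
      · -- item not in pos_2 at all: both sides skip
        have hnb : item ∉ pos_2.drop p := fun h => hmem2 (List.mem_of_mem_drop h)
        rw [show pvStepA (acc, pos_2.drop p) item = (acc, pos_2.drop p) from by
              simp [pvStepA, hnb],
            show pvStepB (pvBuildOcc pos_2) (acc, (p : Int)) item = (acc, (p : Int)) from by
              simp [pvStepB, hcont, hmem2]]
        exact ih acc p

-- ===== VERDICT (by name: the statement is the Claim_ definition above) =====
theorem common_items_def_spec : Claim_equal_common_items_def := by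
  intro pos_1 pos_2 _
  unfold Spec_common_items_def common_items_def common_items_def_alt
  have := pvLoop_eq pos_2 pos_1 [] 0
  simpa using this
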